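-- pv_equiv track=rewrite | github.com/andresr27/hackerrank-python | Porject Euler/Project_Euler_237_Mazare.py | tCount
-- ===== SOURCE A (Python) =====
-- mod = (10 ** 9)+7
--
-- cacheT = {}
--
-- allowed_transitions = set([
--   (0,0), (0,2), (2,1), (0,8), (0,7), (7,1),
--   (1,1), (1,4), (4,0),
--   (2,4), (3,6), (4,5), (4,7), (4,8),
--   (4,2), (6,3), (5,4), (7,4), (8,4)
-- ])
--
-- def tCount(pos,out,width):
--   elem = (pos, out, width)
--
--   if elem in cacheT:
--     return cacheT[elem]
--   if width == 1:
--     if (pos, out) in allowed_transitions: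
--       return 1
--     else:
--       return 0
--   r = 0
--   left_rec = width // 2
--   right_rec = width - left_rec
--   for i in range(8):
--     comb = tCount(pos, i, left_rec) * tCount(i, out, right_rec)
--     r += comb
--     r = r % mod
--   #res = res % mod
--   cacheT[elem] = r
--   return r
-- ===== SOURCE B (Python) =====
-- mod = (10 ** 9)+7
--
-- allowed_transitions = set([
--   (0,0), (0,2), (2,1), (0,8), (0,7), (7,1),
--   (1,1), (1,4), (4,0),
--   (2,4), (3,6), (4,5), (4,7), (4,8),
--   (4,2), (6,3), (5,4), (7,4), (8,4)
-- ])
--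
-- def _ind(a, b):
--   return 1 if (a, b) in allowed_transitions else 0
--
-- def _matmul(X, Y):
--   return [[sum(X[i][k] * Y[k][j] for k in range(8)) % mod for j in range(8)]
--           for i in range(8)]
--
-- def tCount(pos, out, width):
--   if width == 1:
--     return _ind(pos, out)
--   # matrix of one-step transitions between the eight interior states 0..7
--   base = [[_ind(i, j) for j in range(8)] for i in range(8)]
--   P = [[1 if i == j else 0 for j in range(8)] for i in range(8)]
--   e = width - 2
--   while e > 0:
--     if e & 1:
--       P = _matmul(P, base)
--     base = _matmul(base, base)
--     e >>= 1
--   v = [_ind(pos, i) for i in range(8)]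
--   w = [sum(v[i] * P[i][j] for i in range(8)) % mod for j in range(8)]
--   return sum(w[j] * _ind(j, out) for j in range(8)) % mod
-- ===== Notes on version B (the rewrite author's own statement) =====
-- stated objective: alternative
-- what changed: Replaces A's memoized top-down recursion (splitting width in halves and summing over one intermediate state per split) with an iterative 8x8 transition-matrix exponentiation by squaring over the binary bits of width-2, combined with the one-step in/out vectors.
import Mathlib
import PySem

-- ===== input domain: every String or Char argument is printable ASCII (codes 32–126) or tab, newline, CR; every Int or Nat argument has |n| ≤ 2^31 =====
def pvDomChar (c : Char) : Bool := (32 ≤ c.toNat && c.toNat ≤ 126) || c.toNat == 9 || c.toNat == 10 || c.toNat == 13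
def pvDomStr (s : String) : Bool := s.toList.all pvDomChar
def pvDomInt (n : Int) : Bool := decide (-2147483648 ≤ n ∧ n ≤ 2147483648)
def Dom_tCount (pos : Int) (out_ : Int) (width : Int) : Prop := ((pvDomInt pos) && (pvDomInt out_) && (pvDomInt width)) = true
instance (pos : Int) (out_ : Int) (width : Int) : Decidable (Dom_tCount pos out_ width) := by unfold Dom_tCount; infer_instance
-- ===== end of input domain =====

-- B replaces A's memoized halving recursion by iterative 8x8 matrix exponentiation
-- over the binary bits of width-2 (a genuinely different, non-recursive algorithm of
-- the same O(log width) cost). Python A also mutates a module-level cache dict; the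
-- equivalence proved here is about the return value only.

def pvMod : Int := (10 ^ 9) + 7

def pvAllowed : PySem.Set (Int × Int) := PySem.Set.ofList [
  (0,0), (0,2), (2,1), (0,8), (0,7), (7,1),
  (1,1), (1,4), (4,0),
  (2,4), (3,6), (4,5), (4,7), (4,8),
  (4,2), (6,3), (5,4), (7,4), (8,4)]

-- ===== PORT A =====
-- Python's global memo dict `cacheT` is threaded through the recursion as explicit
-- state (each top-level call starts it empty: the cache only ever holds the values the
-- recursion itself computes, so the returned value is unchanged).  Fuel `width.toNat`
-- bounds the recursion depth; it is never exhausted when width ≥ 1 (proved below).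
def tCountGo : Nat → Int → Int → Int → PySem.Dict (Int × Int × Int) Int →
    Int × PySem.Dict (Int × Int × Int) Int
  | 0, _, _, _, c => (0, c)
  | fuel+1, pos, out_, width, cache =>
    match cache.get? (pos, out_, width) with
    | some v => (v, cache)
    | none =>
      if width = 1 then
        (if pvAllowed.contains (pos, out_) then 1 else 0, cache)
      else
        let left_rec := PySem.Int.floordiv width 2
        let right_rec := width - left_rec
        let rc := (PySem.List.pyRange 0 8 1).foldl
          (fun (acc : Int × PySem.Dict (Int × Int × Int) Int) i =>
            let x := tCountGo fuel pos i left_rec acc.2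
            let y := tCountGo fuel i out_ right_rec x.2
            (PySem.Int.mod (acc.1 + x.1 * y.1) pvMod, y.2))
          (0, cache)
        (rc.1, rc.2.insert (pos, out_, width) rc.1)

def tCount (pos : Int) (out_ : Int) (width : Int) : Int :=
  (tCountGo width.toNat pos out_ width PySem.Dict.empty).1

-- ===== PORT B =====
def pvInd (a : Int) (b : Int) : Int := if pvAllowed.contains (a, b) then 1 else 0

-- Source B indexes X[i][k] with indices always in range 0..7 on 8-lists, so List.getD is
-- exact here (no Python IndexError is reachable).
def pvMatmul (X : List (List Int)) (Y : List (List Int)) : List (List Int) :=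
  (List.range 8).map fun i => (List.range 8).map fun j =>
    PySem.Int.mod (((List.range 8).map fun k =>
      (X.getD i []).getD k 0 * (Y.getD k []).getD j 0).sum) pvMod

-- the while-loop of Source B: while e > 0: if e&1: P = P*base; base = base*base; e >>= 1
def pvPowLoop (e : Nat) (P : List (List Int)) (base : List (List Int)) :
    List (List Int) :=
  if h : e = 0 then P
  else
    let P' := if e % 2 = 1 then pvMatmul P base else P
    pvPowLoop (e / 2) P' (pvMatmul base base)
  termination_by e
  decreasing_by exact Nat.div_lt_self (Nat.pos_of_ne_zero h) (by norm_num)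

def tCount_alt (pos : Int) (out_ : Int) (width : Int) : Int :=
  if width = 1 then pvInd pos out_
  else
    let base := (List.range 8).map fun (i : Nat) => (List.range 8).map fun (j : Nat) =>
      pvInd (i : Int) (j : Int)
    let P0 := (List.range 8).map fun i => (List.range 8).map fun j =>
      if i = j then (1 : Int) else 0
    let P := pvPowLoop (width - 2).toNat P0 base
    let v := (List.range 8).map fun (i : Nat) => pvInd pos (i : Int)
    let w := (List.range 8).map fun j =>
      PySem.Int.mod (((List.range 8).map fun i =>
        v.getD i 0 * (P.getD i []).getD j 0).sum) pvMod
    PySem.Int.mod (((List.range 8).map fun (j : Nat) =>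
      w.getD j 0 * pvInd (j : Int) out_).sum) pvMod

-- ===== PRECONDITION & SPEC =====
-- Pre_ excludes width ≤ 0, on which Python A recurses forever (RecursionError).
def Pre_tCount (pos : Int) (out_ : Int) (width : Int) : Prop := 1 ≤ width
instance (pos : Int) (out_ : Int) (width : Int) : Decidable (Pre_tCount pos out_ width) := by
  unfold Pre_tCount; infer_instance

def pvWitness_tCount : Int × Int × Int := (0, 4, 5)

def Spec_tCount (pos : Int) (out_ : Int) (width : Int) (out : Int) : Prop :=
  out = tCount_alt pos out_ width
instance (pos : Int) (out_ : Int) (width : Int) (out : Int) :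
    Decidable (Spec_tCount pos out_ width out) := by unfold Spec_tCount; infer_instance

-- ===== CLAIM (what is proved, stated in full; the proofs are below) =====
def Claim_equal_tCount : Prop := ∀ (pos : Int) (out_ : Int) (width : Int),
  Dom_tCount pos out_ width → Pre_tCount pos out_ width →
  Spec_tCount pos out_ width (tCount pos out_ width)

-- ===== LEMMAS AND PROOFS =====

-- pure (un-modded) count of transition paths with k+1 edges, intermediates in 0..7
def gF : Int → Int → Nat → Int
  | p, o, 0 => pvInd p o
  | p, o, k+1 => ∑ i ∈ Finset.range 8, pvInd p (i : Int) * gF (i : Int) o k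

-- the common specification value: what both ports return for width ≥ 1
def pvS (p : Int) (o : Int) (w : Int) : Int := gF p o (w - 1).toNat % pvMod

theorem pvMod_pos : (0 : Int) < pvMod := by norm_num [pvMod]

theorem pvmod_eq (a : Int) : PySem.Int.mod a pvMod = a % pvMod :=
  PySem.Int.mod_eq_emod_of_pos pvMod_pos

theorem pvInd_mod (a b : Int) : pvInd a b % pvMod = pvInd a b := by
  unfold pvInd; split <;> decide

-- accumulation step modulo pvMod
theorem pv_emod_step (r a b : Int) :
    (r % pvMod + a % pvMod * (b % pvMod)) % pvMod = (r + a * b) % pvMod := by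
  have h1 : Int.ModEq pvMod (r % pvMod) r := Int.emod_emod_of_dvd r dvd_rfl
  have h2 : Int.ModEq pvMod (a % pvMod) a := Int.emod_emod_of_dvd a dvd_rfl
  have h3 : Int.ModEq pvMod (b % pvMod) b := Int.emod_emod_of_dvd b dvd_rfl
  exact h1.add (h2.mul h3)

theorem pv_list_range8_sum (f : Int → Int) :
    ((PySem.List.pyRange 0 8 1).map f).sum = ∑ i ∈ Finset.range 8, f (i : Int) := by
  have h : PySem.List.pyRange 0 8 1 = [0, 1, 2, 3, 4, 5, 6, 7] := by decide
  simp [h, Finset.sum_range_succ]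
  ring

theorem pv_list_range8_sum_nat (f : Nat → Int) :
    ((List.range 8).map f).sum = ∑ i ∈ Finset.range 8, f i := by
  simp [List.range_succ, Finset.sum_range_succ]
  ring

-- splitting a path at one intermediate state
theorem gF_split (a b : Nat) (p o : Int) :
    gF p o (a + b + 1) = ∑ i ∈ Finset.range 8, gF p (i : Int) a * gF (i : Int) o b := by
  induction a generalizing p with
  | zero => simp [gF]
  | succ a ih =>
    have : a + 1 + b + 1 = (a + b + 1) + 1 := by omega
    rw [this]
    show (∑ i ∈ Finset.range 8, pvInd p (i : Int) * gF (i : Int) o (a + b + 1)) = _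
    calc (∑ i ∈ Finset.range 8, pvInd p (i : Int) * gF (i : Int) o (a + b + 1))
        = ∑ i ∈ Finset.range 8, pvInd p (i : Int) *
            ∑ j ∈ Finset.range 8, gF (i : Int) (j : Int) a * gF (j : Int) o b := by
          refine Finset.sum_congr rfl fun i _ => by rw [ih]
      _ = ∑ j ∈ Finset.range 8,
            (∑ i ∈ Finset.range 8, pvInd p (i : Int) * gF (i : Int) (j : Int) a) *
            gF (j : Int) o b := by
          simp_rw [Finset.mul_sum, Finset.sum_mul]
          rw [Finset.sum_comm]
          exact Finset.sum_congr rfl fun i _ => Finset.sum_congr rfl fun j _ => by ring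
      _ = ∑ j ∈ Finset.range 8, gF p (j : Int) (a + 1) * gF (j : Int) o b := by
          refine Finset.sum_congr rfl fun j _ => by rfl

-- ---------- A side ----------

def ValidC (c : PySem.Dict (Int × Int × Int) Int) : Prop :=
  ∀ k v, c.get? k = some v → v = pvS k.1 k.2.1 k.2.2

theorem validC_empty : ValidC PySem.Dict.empty := by
  intro k v h
  simp [PySem.Dict.get?_empty] at h

theorem pv_sum_modeq {s : Finset Nat} (f g : Nat → Int)
    (h : ∀ i ∈ s, Int.ModEq pvMod (f i) (g i)) :
    (∑ i ∈ s, f i) % pvMod = (∑ i ∈ s, g i) % pvMod := by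
  classical
  induction s using Finset.induction_on with
  | empty => rfl
  | insert a s ha ih =>
    rw [Finset.sum_insert ha, Finset.sum_insert ha]
    exact (h a (Finset.mem_insert_self a s)).add
      (ih fun i hi => h i (Finset.mem_insert_of_mem hi))

theorem getD_map_range8 {α : Type} (f : Nat → α) (d : α) {j : Nat} (hj : j < 8) :
    ((List.range 8).map f).getD j d = f j := by
  simp [List.getD_eq_getElem?_getD, hj]

def pvStep (fuel : Nat) (p o lft rgt : Int)
    (acc : Int × PySem.Dict (Int × Int × Int) Int) (i : Int) :
    Int × PySem.Dict (Int × Int × Int) Int :=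
  let x := tCountGo fuel p i lft acc.2
  let y := tCountGo fuel i o rgt x.2
  (PySem.Int.mod (acc.1 + x.1 * y.1) pvMod, y.2)

theorem pv_fold_key (fuel : Nat) (p o lft rgt : Int)
    (hrec : ∀ (p o w : Int) c, ValidC c → 1 ≤ w → w.toNat ≤ fuel →
      (tCountGo fuel p o w c).1 = pvS p o w ∧ ValidC (tCountGo fuel p o w c).2)
    (hlw : 1 ≤ lft) (hrw : 1 ≤ rgt) (hlf : lft.toNat ≤ fuel) (hrf : rgt.toNat ≤ fuel) :
    ∀ (L : List Int) (r0 : Int) (c : PySem.Dict (Int × Int × Int) Int), ValidC c →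
      ((L.foldl (pvStep fuel p o lft rgt) (r0 % pvMod, c)).1
        = (r0 + (L.map fun i =>
            gF p i (lft - 1).toNat * gF i o (rgt - 1).toNat).sum) % pvMod)
      ∧ ValidC (L.foldl (pvStep fuel p o lft rgt) (r0 % pvMod, c)).2 := by
  intro L
  induction L with
  | nil => intro r0 c hc; exact ⟨by simp, hc⟩
  | cons i L ihL =>
    intro r0 c hc
    have hx := hrec p i lft c hc hlw hlf
    have hy := hrec i o rgt (tCountGo fuel p i lft c).2 hx.2 hrw hrf
    have hstep : pvStep fuel p o lft rgt (r0 % pvMod, c) i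
        = ((r0 + gF p i (lft - 1).toNat * gF i o (rgt - 1).toNat) % pvMod,
           (tCountGo fuel i o rgt (tCountGo fuel p i lft c).2).2) := by
      simp only [pvStep]
      rw [pvmod_eq, hx.1, hy.1]
      unfold pvS
      rw [pv_emod_step]
    rw [List.foldl_cons, hstep]
    have hmain := ihL (r0 + gF p i (lft - 1).toNat * gF i o (rgt - 1).toNat)
      (tCountGo fuel i o rgt (tCountGo fuel p i lft c).2).2 hy.2
    refine ⟨?_, hmain.2⟩
    rw [hmain.1]
    congr 1
    simp [List.sum_cons]
    ring

theorem tCountGo_correct : ∀ fuel (p o w : Int) c, ValidC c → 1 ≤ w → w.toNat ≤ fuel →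
    (tCountGo fuel p o w c).1 = pvS p o w ∧ ValidC (tCountGo fuel p o w c).2 := by
  intro fuel
  induction fuel with
  | zero => intro p o w c _ hw hf; exfalso; omega
  | succ fuel ih =>
    intro p o w c hc hw hf
    rw [tCountGo]
    cases hget : c.get? (p, o, w) with
    | some v => exact ⟨hc _ _ hget, hc⟩
    | none =>
      by_cases h1 : w = 1
      · subst h1
        rw [if_pos rfl]
        refine ⟨?_, hc⟩
        show (if pvAllowed.contains (p, o) then (1 : Int) else 0) = pvS p o 1
        unfold pvS
        norm_num
        rw [show gF p o 0 = pvInd p o from rfl, pvInd_mod]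
        simp [pvInd]
      · rw [if_neg h1]
        have hw2 : 2 ≤ w := by omega
        have hfd : PySem.Int.floordiv w 2 = w / 2 :=
          PySem.Int.floordiv_eq_ediv_of_pos (by norm_num)
        have hlw : 1 ≤ PySem.Int.floordiv w 2 := by rw [hfd]; omega
        have hrw : 1 ≤ w - PySem.Int.floordiv w 2 := by rw [hfd]; omega
        have hlf : (PySem.Int.floordiv w 2).toNat ≤ fuel := by rw [hfd]; omega
        have hrf : (w - PySem.Int.floordiv w 2).toNat ≤ fuel := by rw [hfd]; omega
        have hres := pv_fold_key fuel p o (PySem.Int.floordiv w 2)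
          (w - PySem.Int.floordiv w 2) ih hlw hrw hlf hrf
          (PySem.List.pyRange 0 8 1) 0 c hc
        rw [Int.zero_emod] at hres
        have hsum : ((PySem.List.pyRange 0 8 1).map fun i =>
              gF p i (PySem.Int.floordiv w 2 - 1).toNat *
              gF i o (w - PySem.Int.floordiv w 2 - 1).toNat).sum
            = gF p o (w - 1).toNat := by
          rw [pv_list_range8_sum]
          rw [← gF_split ((PySem.Int.floordiv w 2 - 1).toNat)
              ((w - PySem.Int.floordiv w 2 - 1).toNat) p o]
          congr 1
          rw [hfd]
          omega
        have h1' : ((PySem.List.pyRange 0 8 1).foldl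
            (pvStep fuel p o (PySem.Int.floordiv w 2) (w - PySem.Int.floordiv w 2))
            (0, c)).1 = pvS p o w := by
          rw [hres.1, hsum]
          simp [pvS]
        have hval := hres.2
        refine ⟨h1', ?_⟩
        intro k v hkv
        rw [PySem.Dict.get?_insert] at hkv
        by_cases hk : k = (p, o, w)
        · rw [if_pos hk] at hkv
          subst hk
          cases hkv
          exact h1'
        · rw [if_neg hk] at hkv
          exact hval _ _ hkv

-- ---------- B side ----------

-- entries of the matrices maintained by Source B's loop: identity for e = 0,
-- else the modded path count with e edges between interior states
def pvH (e : Nat) (i j : Nat) : Int :=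
  if e = 0 then (if i = j then 1 else 0) else gF (i : Int) (j : Int) (e - 1) % pvMod

def RepM (X : List (List Int)) (φ : Nat → Nat → Int) : Prop :=
  X = (List.range 8).map fun i => (List.range 8).map fun j => φ i j

theorem RepM_entry {X φ} (h : RepM X φ) {i j : Nat} (hi : i < 8) (hj : j < 8) :
    (X.getD i []).getD j 0 = φ i j := by
  subst h
  simp [List.getD_eq_getElem?_getD, List.getElem?_map, List.getElem?_range, hi, hj]

theorem pvH_mod (e i j : Nat) : pvH e i j % pvMod = pvH e i j := by
  unfold pvH
  split
  · split <;> decide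
  · exact Int.emod_emod_of_dvd _ dvd_rfl

theorem RepM_matmul {X Y φ ψ} (hX : RepM X φ) (hY : RepM Y ψ) :
    RepM (pvMatmul X Y) (fun i j => (∑ k ∈ Finset.range 8, φ i k * ψ k j) % pvMod) := by
  unfold RepM pvMatmul
  refine List.map_congr_left fun i hi => ?_
  refine List.map_congr_left fun j hj => ?_
  rw [pvmod_eq, pv_list_range8_sum_nat]
  congr 1
  refine Finset.sum_congr rfl fun k hk => ?_
  rw [RepM_entry hX (List.mem_range.mp hi) (List.mem_range.mp hk),
      RepM_entry hY (List.mem_range.mp hk) (List.mem_range.mp hj)]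

theorem RepM_congr {X : List (List Int)} {φ ψ : Nat → Nat → Int} (h : RepM X φ)
    (he : ∀ i j, i < 8 → j < 8 → φ i j = ψ i j) : RepM X ψ := by
  unfold RepM at h ⊢
  rw [h]
  exact List.map_congr_left fun i hi => List.map_congr_left fun j hj =>
    he _ _ (List.mem_range.mp hi) (List.mem_range.mp hj)

theorem pvH_compose (e1 e2 : Nat) {i j : Nat} (hi : i < 8) (hj : j < 8) :
    (∑ k ∈ Finset.range 8, pvH e1 i k * pvH e2 k j) % pvMod = pvH (e1 + e2) i j := by
  match e1, e2 with
  | 0, e2 =>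
    have hs : (∑ k ∈ Finset.range 8, pvH 0 i k * pvH e2 k j) = pvH e2 i j := by
      calc (∑ k ∈ Finset.range 8, pvH 0 i k * pvH e2 k j)
          = ∑ k ∈ Finset.range 8, (if i = k then pvH e2 k j else 0) :=
            Finset.sum_congr rfl fun k _ => by by_cases h : i = k <;> simp [pvH, h]
        _ = pvH e2 i j := by
            rw [Finset.sum_ite_eq]
            simp [Finset.mem_range.mpr hi]
    rw [hs, Nat.zero_add, pvH_mod]
  | e1 + 1, 0 =>
    have hs : (∑ k ∈ Finset.range 8, pvH (e1+1) i k * pvH 0 k j) = pvH (e1+1) i j := by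
      calc (∑ k ∈ Finset.range 8, pvH (e1+1) i k * pvH 0 k j)
          = ∑ k ∈ Finset.range 8, (if k = j then pvH (e1+1) i k else 0) :=
            Finset.sum_congr rfl fun k _ => by by_cases h : k = j <;> simp [pvH, h]
        _ = pvH (e1+1) i j := by
            rw [Finset.sum_ite_eq']
            simp [Finset.mem_range.mpr hj]
    rw [hs, pvH_mod]
  | a + 1, b + 1 =>
    have h1 : (∑ k ∈ Finset.range 8, pvH (a+1) i k * pvH (b+1) k j) % pvMod
        = (∑ k ∈ Finset.range 8, gF (i : Int) (k : Int) a * gF (k : Int) (j : Int) b) % pvMod := by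
      refine pv_sum_modeq _ _ fun k _ => ?_
      have m1 : Int.ModEq pvMod (gF (i:Int) (k:Int) a % pvMod) (gF (i:Int) (k:Int) a) :=
        Int.emod_emod_of_dvd _ dvd_rfl
      have m2 : Int.ModEq pvMod (gF (k:Int) (j:Int) b % pvMod) (gF (k:Int) (j:Int) b) :=
        Int.emod_emod_of_dvd _ dvd_rfl
      exact m1.mul m2
    rw [h1, ← gF_split a b (i : Int) (j : Int)]
    show gF (i:Int) (j:Int) (a + b + 1) % pvMod = pvH (a + 1 + (b + 1)) i j
    have : a + 1 + (b + 1) - 1 = a + b + 1 := by omega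
    simp [pvH, this]

theorem pvPowLoop_rep : ∀ e a b (P B : List (List Int)), RepM P (pvH a) → RepM B (pvH b) →
    RepM (pvPowLoop e P B) (pvH (a + e * b)) := by
  intro e
  induction e using Nat.strong_induction_on with
  | _ e ih =>
    intro a b P B hP hB
    rw [pvPowLoop]
    by_cases he : e = 0
    · rw [dif_pos he]
      subst he
      simpa using hP
    · rw [dif_neg he]
      have hB2 : RepM (pvMatmul B B) (pvH (b + b)) :=
        RepM_congr (RepM_matmul hB hB) fun i j hi hj => pvH_compose b b hi hj
      by_cases hodd : e % 2 = 1
      · rw [if_pos hodd]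
        have hP' : RepM (pvMatmul P B) (pvH (a + b)) :=
          RepM_congr (RepM_matmul hP hB) fun i j hi hj => pvH_compose a b hi hj
        have := ih (e / 2) (Nat.div_lt_self (Nat.pos_of_ne_zero he) (by norm_num))
          (a + b) (b + b) _ _ hP' hB2
        obtain ⟨q, hq⟩ : ∃ q, e = 2 * q + 1 := ⟨e / 2, by omega⟩
        subst hq
        have hq2 : (2 * q + 1) / 2 = q := by omega
        rw [hq2] at this
        have heq : a + b + q * (b + b) = a + (2 * q + 1) * b := by ring
        rw [heq] at this
        simpa only [hq2] using this
      · rw [if_neg hodd]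
        have := ih (e / 2) (Nat.div_lt_self (Nat.pos_of_ne_zero he) (by norm_num))
          a (b + b) _ _ hP hB2
        obtain ⟨q, hq⟩ : ∃ q, e = 2 * q := ⟨e / 2, by omega⟩
        subst hq
        have hq2 : 2 * q / 2 = q := by omega
        rw [hq2] at this
        have heq : a + q * (b + b) = a + 2 * q * b := by ring
        rw [heq] at this
        simpa only [hq2] using this

-- ---------- assembly ----------

theorem tCount_alt_correct (p o w : Int) (hw : 1 ≤ w) : tCount_alt p o w = pvS p o w := by
  by_cases h1 : w = 1
  · subst h1
    rw [tCount_alt, if_pos rfl]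
    unfold pvS
    norm_num
    rw [show gF p o 0 = pvInd p o from rfl, pvInd_mod]
  · have hw2 : 2 ≤ w := by omega
    rw [tCount_alt, if_neg h1]
    simp only [pvmod_eq]
    set e := (w - 2).toNat with he
    have hP0 : RepM ((List.range 8).map fun i => (List.range 8).map fun j =>
        if i = j then (1 : Int) else 0) (pvH 0) :=
      RepM_congr rfl fun i j _ _ => by simp [pvH]
    have hbase : RepM ((List.range 8).map fun (i : Nat) => (List.range 8).map fun (j : Nat) =>
        pvInd (i : Int) (j : Int)) (pvH 1) :=
      RepM_congr rfl fun i j _ _ => by simp [pvH, gF, pvInd_mod]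
    have hP : RepM (pvPowLoop e ((List.range 8).map fun i => (List.range 8).map fun j =>
        if i = j then (1 : Int) else 0) ((List.range 8).map fun (i : Nat) => (List.range 8).map fun (j : Nat) =>
        pvInd (i : Int) (j : Int))) (pvH e) := by
      have := pvPowLoop_rep e 0 1 _ _ hP0 hbase
      simpa using this
    have hv : ∀ i : Nat, i < 8 → ((List.range 8).map fun (i : Nat) => pvInd p (i : Int)).getD i 0
        = pvInd p (i : Int) := fun i hi => getD_map_range8 _ _ hi
    have hW : ∀ j : Nat, j < 8 →
        (((List.range 8).map fun i =>
            ((List.range 8).map fun (i : Nat) => pvInd p (i : Int)).getD i 0 *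
            ((pvPowLoop e ((List.range 8).map fun i => (List.range 8).map fun j =>
                if i = j then (1 : Int) else 0)
              ((List.range 8).map fun (i : Nat) => (List.range 8).map fun (j : Nat) =>
                pvInd (i : Int) (j : Int))).getD i []).getD j 0).sum) % pvMod
          = gF p (j : Int) e % pvMod := by
      intro j hj
      rw [pv_list_range8_sum_nat]
      rw [Finset.sum_congr rfl fun i hi => by
        rw [hv i (Finset.mem_range.mp hi), RepM_entry hP (Finset.mem_range.mp hi) hj]]
      cases e with
      | zero =>
        have hs : (∑ i ∈ Finset.range 8, pvInd p (i : Int) * pvH 0 i j)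
            = pvInd p (j : Int) := by
          calc (∑ i ∈ Finset.range 8, pvInd p (i : Int) * pvH 0 i j)
              = ∑ i ∈ Finset.range 8, (if i = j then pvInd p (i : Int) else 0) :=
                Finset.sum_congr rfl fun i _ => by by_cases h : i = j <;> simp [pvH, h]
            _ = pvInd p (j : Int) := by
                rw [Finset.sum_ite_eq']
                simp [Finset.mem_range.mpr hj]
        rw [hs]
        rfl
      | succ d =>
        have hmm : (∑ i ∈ Finset.range 8, pvInd p (i : Int) * pvH (d+1) i j) % pvMod
            = (∑ i ∈ Finset.range 8, pvInd p (i : Int) * gF (i : Int) (j : Int) d) % pvMod := by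
          refine pv_sum_modeq _ _ fun i _ => ?_
          have m2 : Int.ModEq pvMod (gF (i:Int) (j:Int) d % pvMod) (gF (i:Int) (j:Int) d) :=
            Int.emod_emod_of_dvd _ dvd_rfl
          exact (Int.ModEq.refl (pvInd p (i : Int))).mul m2
        rw [hmm]
        rfl
    rw [pv_list_range8_sum_nat]
    rw [Finset.sum_congr rfl fun j hj => by
      rw [getD_map_range8 _ _ (Finset.mem_range.mp hj), hW j (Finset.mem_range.mp hj)]]
    have hmm2 : (∑ j ∈ Finset.range 8, gF p (j : Int) e % pvMod * pvInd (j : Int) o) % pvMod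
        = (∑ j ∈ Finset.range 8, gF p (j : Int) e * gF (j : Int) o 0) % pvMod := by
      refine pv_sum_modeq _ _ fun j _ => ?_
      have m1 : Int.ModEq pvMod (gF p (j:Int) e % pvMod) (gF p (j:Int) e) :=
        Int.emod_emod_of_dvd _ dvd_rfl
      exact m1.mul (Int.ModEq.refl (pvInd (j : Int) o))
    rw [hmm2, ← gF_split e 0 p o]
    unfold pvS
    have : e + 0 + 1 = (w - 1).toNat := by omega
    rw [this]

-- ===== VERDICT (by name: the statement is the Claim_ definition above) =====
theorem tCount_spec : Claim_equal_tCount := by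
  intro pos out_ width _ hpre
  unfold Spec_tCount
  unfold Pre_tCount at hpre
  have hA := tCountGo_correct width.toNat pos out_ width PySem.Dict.empty validC_empty hpre le_rfl
  rw [tCount, hA.1, tCount_alt_correct pos out_ width hpre]
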